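-- pv_equiv track=rewrite | github.com/Codaily/Algorithm_Programmers | Level1/4주차_직업군 추천하기/jihyoung.py | solution
-- ===== SOURCE A (Python) =====
-- def solution(table, languages, preference):
--     answer = {}
--     for i in range (0, len(table)):
--
--         temp = table[i].split()
--         sum = 0
--
--         for j in range(0, len(languages)):
--             try :
--                 score = 6 - temp.index(languages[j])
--             except:
--                 score = 0
--             sum += score * preference[j]
--         answer[temp[0]] = sum
--
--     return sorted([k for k,v in answer.items() if max(answer.values()) == v])[0]
-- ===== SOURCE B (Python) =====
-- def solution(table, languages, preference):
--     best_name = None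
--     best_score = None
--     seen = set()
--     for row in reversed(table):
--         temp = row.split()
--         name = temp[0]
--         if name in seen:
--             continue
--         seen.add(name)
--         score = 0
--         for j in range(len(languages)):
--             if languages[j] in temp:
--                 score += (6 - temp.index(languages[j])) * preference[j]
--         if best_name is None or score > best_score or (score == best_score and name < best_name):
--             best_name = name
--             best_score = score
--     return best_name
-- ===== Notes on version B (the rewrite author's own statement) =====
-- stated objective: faster
-- what changed: B drops the dict-then-filter-then-sort pipeline: one streaming pass over the rows in reverse with a seen-set (so the last row per job name wins, exactly as A's dict overwrite), keeping the best (score, name) pair and updating on strictly larger score or equal score with lexicographically smaller name; A's max(answer.values()) re-evaluated per comprehension item and the final sort disappear.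
import Mathlib
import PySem

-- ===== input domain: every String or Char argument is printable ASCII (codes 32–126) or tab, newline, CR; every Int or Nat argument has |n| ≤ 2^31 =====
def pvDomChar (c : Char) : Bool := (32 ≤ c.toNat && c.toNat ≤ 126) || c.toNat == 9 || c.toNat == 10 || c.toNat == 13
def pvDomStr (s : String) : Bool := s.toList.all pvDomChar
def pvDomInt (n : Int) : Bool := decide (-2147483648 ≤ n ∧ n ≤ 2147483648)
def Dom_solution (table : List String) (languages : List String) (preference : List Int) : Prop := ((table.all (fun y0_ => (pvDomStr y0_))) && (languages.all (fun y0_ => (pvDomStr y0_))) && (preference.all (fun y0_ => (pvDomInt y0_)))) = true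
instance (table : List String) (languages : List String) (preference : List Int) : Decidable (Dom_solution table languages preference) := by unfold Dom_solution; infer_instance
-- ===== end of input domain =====

-- B replaces A's dict-then-filter-then-max-then-sort pipeline by one streaming pass over the rows in
-- reverse with a seen-set (the last row per job name wins, as with A's dict overwrite), keeping the
-- best (score, name) pair; objective: faster (a timing run measured it; A re-evaluates max(answer.values()) per item).


-- ===== PORT A =====
-- Shared row-score helper: BOTH Pythons compute each row's score element-for-element identically
-- (A: try score = 6 - temp.index(lang) except score = 0; B: the membership-guarded equivalent, adding 0
-- when the language is absent). languages[j] is always in range; preference[j] is in range under Pre_.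
def pvRowScore (temp : List String) (languages : List String) (preference : List Int) : Int :=
  (List.range languages.length).foldl
    (fun s j =>
      s + (match PySem.List.index? temp (languages.getD j "") with
           | some k => 6 - (k : Int)
           | none => 0) * preference.getD j 0) 0

-- Port of A. Python's max(answer.values()) is re-evaluated per comprehension item but is the same value
-- each time; it is computed once here. answer.values() is nonempty under Pre_ (else Python raises), so
-- the .getD 0 default and the .headD "" default of sorted(...)[0] are never used inside Pre_.
def solution (table : List String) (languages : List String) (preference : List Int) : String :=
  let answer : PySem.Dict String Int := table.foldl
    (fun d row =>
      let temp := PySem.Str.split₀ row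
      d.insert (temp.headD "") (pvRowScore temp languages preference))
    PySem.Dict.empty
  let m := (PySem.List.max? answer.values (fun v => v)).getD 0
  (PySem.List.sorted ((answer.items.filter (fun p => m == p.2)).map (fun p => p.1)) (fun k => k) false).headD ""

-- ===== PORT B =====
-- Port of B (Source B): one streaming pass over reversed(table) with a seen-set (last row per name wins),
-- best_name/best_score as an Option pair. Python returns None on an empty table (outside Pre_); the
-- port returns "" there.
def solution_alt (table : List String) (languages : List String) (preference : List Int) : String :=
  let fin := table.reverse.foldl
    (fun st row =>
      let temp := PySem.Str.split₀ row
      let name := temp.headD ""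
      if PySem.Set.contains st.1 name then st
      else
        let score := pvRowScore temp languages preference
        (PySem.Set.add st.1 name,
         match st.2 with
         | none => some (name, score)
         | some (bn, bs) =>
             if score > bs ∨ (score = bs ∧ name < bn) then some (name, score) else some (bn, bs)))
    ((PySem.Set.empty : PySem.Set String), (none : Option (String × Int)))
  match fin.2 with
  | some (bn, _) => bn
  | none => ""

-- ===== PRECONDITION & SPEC =====
-- Pre_ excludes exactly the inputs where A raises: an empty table (max() of an empty sequence),
-- a whitespace-only row (temp[0] on an empty split), and preference shorter than a nonempty
-- languages list (IndexError on preference[j]).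
def Pre_solution (table : List String) (languages : List String) (preference : List Int) : Prop :=
  table ≠ [] ∧ languages.length ≤ preference.length ∧
  (∀ row ∈ table, PySem.Str.split₀ row ≠ [])
instance (table : List String) (languages : List String) (preference : List Int) : Decidable (Pre_solution table languages preference) := by unfold Pre_solution; infer_instance

def pvWitness_solution : List String × List String × List Int :=
  (["jihyoung python java", "backend java c"], ["python", "java"], [3, 2])

def Spec_solution (table : List String) (languages : List String) (preference : List Int) (out : String) : Prop := out = solution_alt table languages preference
instance (table : List String) (languages : List String) (preference : List Int) (out : String) : Decidable (Spec_solution table languages preference out) := by unfold Spec_solution; infer_instance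

-- ===== CLAIM (what is proved, stated in full; the proofs are below) =====
def Claim_equal_solution : Prop := ∀ (table : List String) (languages : List String) (preference : List Int), Dom_solution table languages preference → Pre_solution table languages preference → Spec_solution table languages preference (solution table languages preference)

-- ===== LEMMAS AND PROOFS =====

-- the (name, score) entry of one table row
def pvEntry (languages : List String) (preference : List Int) (row : String) : String × Int :=
  ((PySem.Str.split₀ row).headD "", pvRowScore (PySem.Str.split₀ row) languages preference)

-- B's streaming update on plain pairs
def pvStep (b x : String × Int) : String × Int :=
  if x.2 > b.2 ∨ (x.2 = b.2 ∧ x.1 < b.1) then x else b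

-- B's best accumulator as a fold (the Option threading of best_name/best_score)
def pvPickO (ob : Option (String × Int)) (L : List (String × Int)) : Option (String × Int) :=
  L.foldl (fun ob q => match ob with | none => some q | some bb => some (pvStep bb q)) ob

-- the entries B actually processes: first occurrence per name, given an already-seen set
def pvDedupK : List (String × Int) → PySem.Set String → List (String × Int)
  | [], _ => []
  | q :: R, seen => if PySem.Set.contains seen q.1 then pvDedupK R seen else q :: pvDedupK R (PySem.Set.add seen q.1)

def pvFirstVal : List (String × Int) → String → Option Int
  | [], _ => none
  | q :: R, k => if k = q.1 then some q.2 else pvFirstVal R k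

def pvLastVal : List (String × Int) → String → Option Int
  | [], _ => none
  | q :: R, k => match pvLastVal R k with
      | some v => some v
      | none => if k = q.1 then some q.2 else none

theorem pvContains_add (s : PySem.Set String) (x y : String) :
    (s.add x).contains y = (s.contains y || y == x) := by
  simp only [PySem.Set.add, PySem.Set.contains]
  split_ifs with h
  · by_cases hyx : y = x <;> simp_all
  · by_cases hyx : y = x <;> simp [hyx]

-- the port-B fold over rows computes pvPickO over the deduplicated entry list
theorem pv_alt_fold (languages : List String) (preference : List Int) :
    ∀ (rows : List String) (seen : PySem.Set String) (ob : Option (String × Int)),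
      (rows.foldl
        (fun st row =>
          if PySem.Set.contains st.1 ((PySem.Str.split₀ row).headD "") then st
          else
            (PySem.Set.add st.1 ((PySem.Str.split₀ row).headD ""),
             match st.2 with
             | none => some ((PySem.Str.split₀ row).headD "", pvRowScore (PySem.Str.split₀ row) languages preference)
             | some (bn, bs) =>
                 if pvRowScore (PySem.Str.split₀ row) languages preference > bs ∨
                    (pvRowScore (PySem.Str.split₀ row) languages preference = bs ∧ (PySem.Str.split₀ row).headD "" < bn)
                 then some ((PySem.Str.split₀ row).headD "", pvRowScore (PySem.Str.split₀ row) languages preference)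
                 else some (bn, bs)))
        (seen, ob)).2
      = pvPickO ob (pvDedupK (rows.map (pvEntry languages preference)) seen) := by
  intro rows
  induction rows with
  | nil => intro seen ob; simp [pvPickO, pvDedupK]
  | cons r rs ih =>
      intro seen ob
      simp only [List.foldl_cons, List.map_cons, pvDedupK]
      by_cases hc : PySem.Set.contains seen ((PySem.Str.split₀ r).headD "") = true
      · rw [if_pos hc, if_pos (by simpa [pvEntry] using hc)]
        exact ih seen ob
      · rw [if_neg hc, if_neg (by simpa [pvEntry] using hc)]
        rw [ih (PySem.Set.add seen ((PySem.Str.split₀ r).headD ""))]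
        simp only [pvPickO, List.foldl_cons, pvEntry]
        cases ob with
        | none => rfl
        | some bb =>
            cases bb with
            | mk bn bs =>
                simp only [pvStep]
                split_ifs <;> rfl

theorem pvPickO_some : ∀ (L : List (String × Int)) (b : String × Int),
    pvPickO (some b) L = some (L.foldl pvStep b) := by
  intro L
  induction L with
  | nil => intro b; rfl
  | cons q L ih =>
      intro b
      simp only [pvPickO, List.foldl_cons] at *
      exact ih (pvStep b q)

-- the streaming fold returns an element of b :: L whose score is maximal and, among maximal
-- scores, whose name is minimal
theorem pv_pick_spec (L : List (String × Int)) :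
    ∀ b : String × Int,
      (L.foldl pvStep b = b ∨ L.foldl pvStep b ∈ L) ∧
      (b.2 ≤ (L.foldl pvStep b).2) ∧ (∀ q ∈ L, q.2 ≤ (L.foldl pvStep b).2) ∧
      (b.2 = (L.foldl pvStep b).2 → (L.foldl pvStep b).1 ≤ b.1) ∧
      (∀ q ∈ L, q.2 = (L.foldl pvStep b).2 → (L.foldl pvStep b).1 ≤ q.1) := by
  induction L with
  | nil => intro b; simp
  | cons x t ih =>
      intro b
      simp only [List.foldl_cons]
      obtain ⟨hmem, hble, hmax, hbmin, hmin⟩ := ih (pvStep b x)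
      by_cases h : x.2 > b.2 ∨ (x.2 = b.2 ∧ x.1 < b.1)
      · -- step picks x
        rw [show pvStep b x = x from by unfold pvStep; rw [if_pos h]] at *
        refine ⟨?_, ?_, ?_, ?_, ?_⟩
        · rcases hmem with h1 | h1
          · exact Or.inr (by simp [h1])
          · exact Or.inr (List.mem_cons_of_mem _ h1)
        · rcases h with h | ⟨h1, _⟩
          · exact le_trans (le_of_lt h) hble
          · exact h1 ▸ hble
        · intro q hq
          rcases List.mem_cons.mp hq with rfl | hq
          · exact hble
          · exact hmax q hq
        · intro hb
          rcases h with h | ⟨h1, h2⟩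
          · exact absurd (hb ▸ hble) (by exact fun hle => absurd (lt_of_lt_of_le h hle) (by omega))
          · exact le_trans (hbmin (h1 ▸ hb)) (le_of_lt h2)
        · intro q hq
          rcases List.mem_cons.mp hq with rfl | hq
          · exact hbmin
          · exact hmin q hq
      · -- step keeps b
        rw [show pvStep b x = b from by unfold pvStep; rw [if_neg h]] at *
        push Not at h
        refine ⟨?_, hble, ?_, hbmin, ?_⟩
        · rcases hmem with h1 | h1
          · exact Or.inl h1
          · exact Or.inr (List.mem_cons_of_mem _ h1)
        · intro q hq
          rcases List.mem_cons.mp hq with rfl | hq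
          · exact le_trans h.1 hble
          · exact hmax q hq
        · intro q hq hq2
          rcases List.mem_cons.mp hq with rfl | hq
          · have hxb : q.2 = b.2 := le_antisymm h.1 (by omega)
            have hbx : b.1 ≤ q.1 := h.2 hxb
            exact le_trans (hbmin (hxb ▸ hq2)) hbx
          · exact hmin q hq hq2

-- head of A's sorted filtered name list = the streaming winner's name
theorem pv_sorted_head (L : List (String × Int)) (p : String × Int) (hp : p ∈ L)
    (hmax : ∀ q ∈ L, q.2 ≤ p.2) (hmin : ∀ q ∈ L, q.2 = p.2 → p.1 ≤ q.1)
    (m : Int) (hm : PySem.List.max? (L.map (fun q => q.2)) (fun v => v) = some m) :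
    (PySem.List.sorted ((L.filter (fun q => m == q.2)).map (fun q => q.1)) (fun k => k) false).headD "" = p.1 := by
  have hmem : m ∈ L.map (fun q => q.2) := PySem.List.max?_mem hm
  obtain ⟨q0, hq0, hq0m⟩ := List.mem_map.mp hmem
  have hmle : m ≤ p.2 := hq0m ▸ hmax q0 hq0
  have hpm : p.2 ≤ m := PySem.List.max?_isMax hm p.2 (List.mem_map_of_mem hp)
  have hmp : m = p.2 := le_antisymm hmle hpm
  have hpF : p.1 ∈ (L.filter (fun q => m == q.2)).map (fun q => q.1) :=
    List.mem_map_of_mem (List.mem_filter.mpr ⟨hp, by simp [hmp]⟩)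
  have hne : PySem.List.sorted ((L.filter (fun q => m == q.2)).map (fun q => q.1)) (fun k => k) false ≠ [] := by
    intro hnil
    rw [PySem.List.sorted_eq_nil_iff] at hnil
    simp [hnil] at hpF
  obtain ⟨h, t, hS⟩ := List.exists_cons_of_ne_nil hne
  have hhmem : h ∈ (L.filter (fun q => m == q.2)).map (fun q => q.1) := by
    have : h ∈ PySem.List.sorted ((L.filter (fun q => m == q.2)).map (fun q => q.1)) (fun k => k) false := by
      rw [hS]; exact List.mem_cons_self
    exact (PySem.List.mem_sorted _ _ _ _).mp this
  obtain ⟨q1, hq1, hq1h⟩ := List.mem_map.mp hhmem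
  have hq1L : q1 ∈ L := (List.mem_filter.mp hq1).1
  have hq1m : q1.2 = p.2 := by
    have := (List.mem_filter.mp hq1).2
    simp at this
    omega
  have hple : p.1 ≤ h := hq1h ▸ hmin q1 hq1L hq1m
  have hhle : h ≤ p.1 := PySem.List.key_head_sorted_le _ _ hS p.1 hpF
  rw [hS, List.headD_cons]
  exact le_antisymm hhle hple

-- A's dict lookup after the whole insert loop = last value written for that name
theorem pv_get_fold (languages : List String) (preference : List Int) :
    ∀ (table : List String) (d : PySem.Dict String Int) (k : String),
      ((table.foldl
        (fun d row => d.insert ((PySem.Str.split₀ row).headD "") (pvRowScore (PySem.Str.split₀ row) languages preference))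
        d).get? k)
      = match pvLastVal (table.map (pvEntry languages preference)) k with
        | some v => some v
        | none => d.get? k := by
  intro table
  induction table with
  | nil => intro d k; rfl
  | cons r rs ih =>
      intro d k
      simp only [List.foldl_cons, List.map_cons, pvLastVal]
      rw [ih]
      cases hl : pvLastVal (rs.map (pvEntry languages preference)) k with
      | some v => rfl
      | none =>
          simp only [PySem.Dict.get?_insert, pvEntry]
          split_ifs <;> rfl

theorem pvFirstVal_append : ∀ (X Y : List (String × Int)) (k : String),
    pvFirstVal (X ++ Y) k
    = match pvFirstVal X k with
      | some v => some v
      | none => pvFirstVal Y k := by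
  intro X
  induction X with
  | nil => intro Y k; rfl
  | cons q R ih =>
      intro Y k
      simp only [List.cons_append, pvFirstVal]
      by_cases hk : k = q.1
      · rw [if_pos hk, if_pos hk]
      · rw [if_neg hk, if_neg hk]
        exact ih Y k

theorem pvFirstVal_reverse : ∀ (P : List (String × Int)) (k : String),
    pvFirstVal P.reverse k = pvLastVal P k := by
  intro P
  induction P with
  | nil => intro k; rfl
  | cons q R ih =>
      intro k
      simp only [List.reverse_cons, pvLastVal]
      rw [pvFirstVal_append, ih]
      cases pvLastVal R k with
      | some v => rfl
      | none => simp [pvFirstVal]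

-- membership of the deduplicated list = first value for an unseen name
theorem pv_mem_dedupK : ∀ (R : List (String × Int)) (seen : PySem.Set String) (k : String) (v : Int),
    (k, v) ∈ pvDedupK R seen ↔ seen.contains k = false ∧ pvFirstVal R k = some v := by
  intro R
  induction R with
  | nil => intro seen k v; simp [pvDedupK, pvFirstVal]
  | cons q R ih =>
      obtain ⟨qk, qv⟩ := q
      intro seen k v
      simp only [pvDedupK, pvFirstVal]
      by_cases hc : PySem.Set.contains seen qk = true
      · rw [if_pos hc, ih]
        by_cases hk : k = qk
        · subst hk
          have hmem : k ∈ seen := by simpa [PySem.Set.contains] using hc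
          simp [PySem.Set.contains, hmem]
        · rw [if_neg hk]
      · rw [if_neg hc]
        rw [Bool.not_eq_true] at hc
        constructor
        · intro hmem
          rcases List.mem_cons.mp hmem with heq | hmem
          · simp only [Prod.mk.injEq] at heq
            obtain ⟨rfl, rfl⟩ := heq
            exact ⟨hc, by simp⟩
          · obtain ⟨h1, h2⟩ := (ih _ _ _).mp hmem
            rw [pvContains_add] at h1
            simp only [Bool.or_eq_false_iff] at h1
            obtain ⟨hs, hne⟩ := h1
            refine ⟨hs, ?_⟩
            rw [if_neg (by simpa using hne)]
            exact h2
        · rintro ⟨hs, hfv⟩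
          by_cases hk : k = qk
          · subst hk
            rw [if_pos rfl] at hfv
            injection hfv with hv
            exact List.mem_cons.mpr (Or.inl (by rw [Prod.mk.injEq]; exact ⟨rfl, hv.symm⟩))
          · rw [if_neg hk] at hfv
            refine List.mem_cons.mpr (Or.inr ((ih _ _ _).mpr ⟨?_, hfv⟩))
            rw [pvContains_add]
            simp only [Bool.or_eq_false_iff]
            exact ⟨hs, by simp [hk]⟩

-- ===== VERDICT (by name: the statement is the Claim_ definition above) =====
theorem solution_spec : Claim_equal_solution := by
  intro table languages preference _ hpre
  obtain ⟨hne, _, _⟩ := hpre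
  -- shorthand for the entry list
  set P := table.map (pvEntry languages preference) with hP
  -- the dictionary A builds
  set dA := table.foldl
    (fun d row => d.insert ((PySem.Str.split₀ row).headD "") (pvRowScore (PySem.Str.split₀ row) languages preference))
    (PySem.Dict.empty : PySem.Dict String Int) with hdA
  have hnodup : dA.keys.Nodup := by
    rw [hdA]
    exact PySem.Dict.nodup_keys_foldl_insert_key table
      (fun row => (PySem.Str.split₀ row).headD "")
      (fun _ row => pvRowScore (PySem.Str.split₀ row) languages preference)
      PySem.Dict.empty (by simp [PySem.Dict.keys_empty])
  -- A's items and B's candidate list have the same members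
  have hget : ∀ k, dA.get? k
      = match pvLastVal P k with | some v => some v | none => none := by
    intro k
    rw [hdA, pv_get_fold]
    cases pvLastVal P k with
    | some v => rfl
    | none => simp [PySem.Dict.get?_empty]
  have hmemAB : ∀ (k : String) (v : Int),
      (k, v) ∈ dA.items ↔ (k, v) ∈ pvDedupK P.reverse PySem.Set.empty := by
    intro k v
    rw [pv_mem_dedupK, pvFirstVal_reverse]
    constructor
    · intro hitems
      have h1 := PySem.Dict.get?_of_mem_items dA hitems hnodup
      rw [hget] at h1
      refine ⟨rfl, ?_⟩
      cases hl : pvLastVal P k with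
      | some w => rw [hl] at h1; exact h1
      | none => rw [hl] at h1; exact absurd h1 (by simp)
    · rintro ⟨_, hlv⟩
      refine PySem.Dict.mem_items_of_get?_eq_some dA ?_
      rw [hget, hlv]
  -- the candidate list is nonempty
  have hPne : P ≠ [] := by
    rw [hP]; simpa using hne
  obtain ⟨q0, R0, hPrev⟩ : ∃ q0 R0, P.reverse = q0 :: R0 := by
    rcases List.exists_cons_of_ne_nil (by simpa using hPne : P.reverse ≠ []) with ⟨a, b, hab⟩
    exact ⟨a, b, hab⟩
  have hLB : pvDedupK P.reverse PySem.Set.empty = q0 :: pvDedupK R0 (PySem.Set.add PySem.Set.empty q0.1) := by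
    rw [hPrev]
    simp only [pvDedupK]
    rw [if_neg (by simp [PySem.Set.contains, PySem.Set.empty])]
  -- the streaming winner and its properties, transported to A's items
  set L' := pvDedupK R0 (PySem.Set.add PySem.Set.empty q0.1) with hL'
  obtain ⟨hmem, hble, hmax, hbmin, hmin⟩ := pv_pick_spec L' q0
  set p := L'.foldl pvStep q0 with hp
  have hpLB : p ∈ pvDedupK P.reverse PySem.Set.empty := by
    rw [hLB]
    rcases hmem with h | h
    · exact h ▸ List.mem_cons_self
    · exact List.mem_cons_of_mem _ h
  have hmaxLB : ∀ q ∈ pvDedupK P.reverse PySem.Set.empty, q.2 ≤ p.2 := by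
    intro q hq
    rw [hLB] at hq
    rcases List.mem_cons.mp hq with rfl | hq
    · exact hble
    · exact hmax q hq
  have hminLB : ∀ q ∈ pvDedupK P.reverse PySem.Set.empty, q.2 = p.2 → p.1 ≤ q.1 := by
    intro q hq hq2
    rw [hLB] at hq
    rcases List.mem_cons.mp hq with rfl | hq
    · exact hbmin hq2
    · exact hmin q hq hq2
  have hpA : p ∈ dA.items := (hmemAB p.1 p.2).mpr (by simpa using hpLB)
  have hmaxA : ∀ q ∈ dA.items, q.2 ≤ p.2 := by
    intro q hq
    exact hmaxLB q (by simpa using (hmemAB q.1 q.2).mp (by simpa using hq))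
  have hminA : ∀ q ∈ dA.items, q.2 = p.2 → p.1 ≤ q.1 := by
    intro q hq
    exact hminLB q (by simpa using (hmemAB q.1 q.2).mp (by simpa using hq))
  -- the maximum A computes
  obtain ⟨m, hm⟩ : ∃ m, PySem.List.max? (dA.items.map (fun q => q.2)) (fun v => v) = some m := by
    cases h : PySem.List.max? (dA.items.map (fun q => q.2)) (fun v => v) with
    | none =>
        rw [PySem.List.max?_eq_none_iff] at h
        simp only [List.map_eq_nil_iff] at h
        exact absurd ((hmemAB p.1 p.2).mpr (by simpa using hpLB)) (by simp [h])
    | some m => exact ⟨m, rfl⟩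
  have hA := pv_sorted_head dA.items p hpA hmaxA hminA m hm
  -- B's fold produces p
  have hfold : (table.reverse.foldl
      (fun st row =>
        if PySem.Set.contains st.1 ((PySem.Str.split₀ row).headD "") then st
        else
          (PySem.Set.add st.1 ((PySem.Str.split₀ row).headD ""),
           match st.2 with
           | none => some ((PySem.Str.split₀ row).headD "", pvRowScore (PySem.Str.split₀ row) languages preference)
           | some (bn, bs) =>
               if pvRowScore (PySem.Str.split₀ row) languages preference > bs ∨
                  (pvRowScore (PySem.Str.split₀ row) languages preference = bs ∧ (PySem.Str.split₀ row).headD "" < bn)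
               then some ((PySem.Str.split₀ row).headD "", pvRowScore (PySem.Str.split₀ row) languages preference)
               else some (bn, bs)))
      ((PySem.Set.empty : PySem.Set String), (none : Option (String × Int)))).2 = some p := by
    rw [pv_alt_fold]
    have hmaprev : table.reverse.map (pvEntry languages preference) = P.reverse := by
      rw [hP, List.map_reverse]
    rw [hmaprev]
    rw [hLB]
    simp only [pvPickO, List.foldl_cons]
    exact pvPickO_some L' q0
  unfold Spec_solution
  simp only [solution, solution_alt, PySem.Dict.values]
  rw [← hdA, hfold, hm]
  simpa using hA
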